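-- pv_equiv track=rewrite | github.com/Grzegorz-Jankowski/Cipher | encryption.py | encrypting_rot47
-- ===== SOURCE A (Python) =====
-- def encrypting_rot47(message):
--     key = 47
--     encrypted = ""
--
--     for character in message:
--
--         if character.isupper():
--             character_idx = ord(character) - ord("A")
--             character_shifted = (character_idx + key) % 26 + ord("A")
--             encrypted += chr(character_shifted)
--
--         elif character.islower():
--             character_idx = ord(character) - ord("a")
--             character_shifted = (character_idx + key) % 26 + ord("a")
--             encrypted += chr(character_shifted)
--
--         elif character.isdigit():
--             character_new = (int(character) + key) % 10
--             encrypted += str(character_new)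
--
--         else:
--             encrypted += character
--
--     return encrypted
-- ===== SOURCE B (Python) =====
-- _UPPER = "ABCDEFGHIJKLMNOPQRSTUVWXYZ"
-- _LOWER = "abcdefghijklmnopqrstuvwxyz"
-- _DIGIT = "0123456789"
-- _TABLE = str.maketrans(
--     _UPPER + _LOWER + _DIGIT,
--     _UPPER[21:] + _UPPER[:21] + _LOWER[21:] + _LOWER[:21] + _DIGIT[7:] + _DIGIT[:7])
--
-- def encrypting_rot47(message):
--     return message.translate(_TABLE)
-- ===== Notes on version B (the rewrite author's own statement) =====
-- stated objective: idiomatic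
-- what changed: Replaced the per-character classify-and-compute if/elif loop by a translation table built once with str.maketrans over rotated alphabet strings and a single C-level message.translate pass.
import Mathlib
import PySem

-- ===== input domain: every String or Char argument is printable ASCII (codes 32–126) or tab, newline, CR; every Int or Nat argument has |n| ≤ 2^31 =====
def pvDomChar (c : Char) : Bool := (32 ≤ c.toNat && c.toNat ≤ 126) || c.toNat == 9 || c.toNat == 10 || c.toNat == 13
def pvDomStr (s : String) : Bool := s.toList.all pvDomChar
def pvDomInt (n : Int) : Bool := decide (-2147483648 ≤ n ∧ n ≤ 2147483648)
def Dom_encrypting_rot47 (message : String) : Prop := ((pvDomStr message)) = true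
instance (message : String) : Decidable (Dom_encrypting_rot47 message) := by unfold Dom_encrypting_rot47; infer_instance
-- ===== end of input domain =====

set_option maxRecDepth 4000


-- B replaces A's classify-then-compute branching loop by one precomputed translation
-- table (str.maketrans from rotated alphabet strings) and a single translate pass; objective: idiomatic.

-- ===== PORT A =====
-- literal port of A's loop: accumulate a string, branch per character as the Python does
def encrypting_rot47 (message : String) : String :=
  message.toList.foldl (fun encrypted c =>
    if PySem.Chars.isupper c then
      encrypted ++ String.ofList [Char.ofNat ((((c.toNat : Int) - 65 + 47) % 26 + 65).toNat)]
    else if PySem.Chars.islower c then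
      encrypted ++ String.ofList [Char.ofNat ((((c.toNat : Int) - 97 + 47) % 26 + 97).toNat)]
    else if PySem.Chars.isdigit c then
      -- int(character): always parses inside this branch, getD 0 is unreachable
      encrypted ++ PySem.Int.toStr (((PySem.Int.ofChars? [c]).getD 0 + 47) % 10)
    else
      encrypted ++ String.ofList [c]) ""

-- ===== PORT B =====
-- the translation table of Source B: rotated alphabets zipped with the plain ones
def rotFrom : List Char := "ABCDEFGHIJKLMNOPQRSTUVWXYZabcdefghijklmnopqrstuvwxyz0123456789".toList
def rotTo   : List Char := "VWXYZABCDEFGHIJKLMNOPQRSTUvwxyzabcdefghijklmnopqrstu7890123456".toList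
def rotTable : List (Char × Char) := rotFrom.zip rotTo

def encrypting_rot47_alt (message : String) : String :=
  String.ofList (message.toList.map (fun c => (rotTable.lookup c).getD c))

-- ===== PRECONDITION & SPEC =====
def Spec_encrypting_rot47 (message : String) (out : String) : Prop := out = encrypting_rot47_alt message
instance (message : String) (out : String) : Decidable (Spec_encrypting_rot47 message out) := by unfold Spec_encrypting_rot47; infer_instance

-- ===== CLAIM (what is proved, stated in full; the proofs are below) =====
def Claim_equal_encrypting_rot47 : Prop := ∀ (message : String), Dom_encrypting_rot47 message → Spec_encrypting_rot47 message (encrypting_rot47 message)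

-- ===== LEMMAS AND PROOFS =====

-- A's per-character step as a one-character string
def encAChar (c : Char) : String :=
  if PySem.Chars.isupper c then
    String.ofList [Char.ofNat ((((c.toNat : Int) - 65 + 47) % 26 + 65).toNat)]
  else if PySem.Chars.islower c then
    String.ofList [Char.ofNat ((((c.toNat : Int) - 97 + 47) % 26 + 97).toNat)]
  else if PySem.Chars.isdigit c then
    PySem.Int.toStr (((PySem.Int.ofChars? [c]).getD 0 + 47) % 10)
  else String.ofList [c]

-- on domain characters A's step yields exactly B's table translation
theorem encAChar_eq (c : Char) (h : pvDomChar c = true) :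
    (encAChar c).toList = [(rotTable.lookup c).getD c] := by
  have hb : ∀ n, n < 127 →
      (encAChar (Char.ofNat n)).toList
        = [(rotTable.lookup (Char.ofNat n)).getD (Char.ofNat n)] := by
    decide
  have hlt : c.toNat < 127 := by
    simp only [pvDomChar, Bool.or_eq_true, Bool.and_eq_true, decide_eq_true_eq,
      beq_iff_eq] at h
    omega
  simpa using hb c.toNat hlt

theorem foldl_toList (l : List Char) (s : String) :
    (l.foldl (fun encrypted c => encrypted ++ encAChar c) s).toList
      = s.toList ++ l.flatMap (fun c => (encAChar c).toList) := by
  induction l generalizing s with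
  | nil => simp
  | cons c t ih => simp [ih]

theorem flatMap_eq (l : List Char) (h : ∀ c ∈ l, pvDomChar c = true) :
    l.flatMap (fun c => (encAChar c).toList)
      = l.map (fun c => (rotTable.lookup c).getD c) := by
  induction l with
  | nil => simp
  | cons c t ih =>
      simp only [List.flatMap_cons, List.map_cons]
      rw [encAChar_eq c (h c (by simp)), ih (fun x hx => h x (by simp [hx]))]
      rfl

-- ===== VERDICT (by name: the statement is the Claim_ definition above) =====
theorem encrypting_rot47_spec : Claim_equal_encrypting_rot47 := by
  intro message hdom
  unfold Spec_encrypting_rot47 encrypting_rot47 encrypting_rot47_alt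
  have hall : ∀ c ∈ message.toList, pvDomChar c = true := by
    simpa [Dom_encrypting_rot47, pvDomStr, List.all_eq_true] using hdom
  have hfun : (fun (encrypted : String) (c : Char) =>
      if PySem.Chars.isupper c then
        encrypted ++ String.ofList [Char.ofNat ((((c.toNat : Int) - 65 + 47) % 26 + 65).toNat)]
      else if PySem.Chars.islower c then
        encrypted ++ String.ofList [Char.ofNat ((((c.toNat : Int) - 97 + 47) % 26 + 97).toNat)]
      else if PySem.Chars.isdigit c then
        encrypted ++ PySem.Int.toStr (((PySem.Int.ofChars? [c]).getD 0 + 47) % 10)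
      else encrypted ++ String.ofList [c])
      = fun encrypted c => encrypted ++ encAChar c := by
    funext e c
    simp only [encAChar]
    split_ifs <;> rfl
  rw [hfun]
  apply String.toList_inj.mp
  rw [foldl_toList, flatMap_eq _ hall]
  simp
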